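-- pv_equiv track=rewrite | github.com/nakagami/sqliteio | sqliteio/record.py | varint_and_next_index
-- ===== SOURCE A (Python) =====
-- def varint_and_next_index(b, i):
--     "Get the value of the first varint and index to trailing bytes"
--     if (c := b[i]) < 0x80:
--         return c, i + 1
--     n = 0
--     while (c := b[i]) >= 0x80:
--         n = (n << 7) + (c & 0x7f)
--         i += 1
--     return (n << 7) + c, i + 1
-- ===== SOURCE B (Python) =====
-- def varint_and_next_index(b, i):
--     "Get the value of the first varint and index to trailing bytes"
--     # phase 1: scan forward to the terminating byte (< 0x80); IndexError if none
--     j = i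
--     while b[j] >= 0x80:
--         j += 1
--     # phase 2: fold the continuation bytes, then add the final byte
--     value = 0
--     for k in range(i, j):
--         value = value * 128 + (b[k] & 0x7f)
--     return value * 128 + b[j], j + 1
-- ===== Notes on version B (the rewrite author's own statement) =====
-- stated objective: alternative
-- what changed: A's single interleaved while-loop that shifts and accumulates as it reads is replaced by a two-phase decomposition: first scan forward for the terminating byte (< 0x80), then fold the scanned bytes into the value with acc = acc*128 + (byte & 0x7f) and add the final byte.
-- outside the precondition, e.g. on varint_and_next_index([128, 200], 0): A raises IndexError, B raises IndexError; on varint_and_next_index([5], 3): A raises IndexError, B raises IndexError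
import Mathlib
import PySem

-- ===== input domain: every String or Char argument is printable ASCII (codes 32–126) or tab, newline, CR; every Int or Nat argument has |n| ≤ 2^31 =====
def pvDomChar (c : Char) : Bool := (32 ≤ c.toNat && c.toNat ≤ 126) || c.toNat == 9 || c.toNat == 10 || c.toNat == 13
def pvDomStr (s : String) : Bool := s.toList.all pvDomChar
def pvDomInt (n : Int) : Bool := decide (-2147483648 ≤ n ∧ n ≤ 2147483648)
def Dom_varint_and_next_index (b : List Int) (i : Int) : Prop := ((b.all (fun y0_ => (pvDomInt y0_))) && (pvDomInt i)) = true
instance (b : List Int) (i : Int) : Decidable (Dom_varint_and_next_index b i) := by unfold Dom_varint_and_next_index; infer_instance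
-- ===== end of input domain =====

-- B replaces A's interleaved shift-accumulate while-loop by a two-phase decomposition
-- (scan for the terminating byte, then fold the bytes); objective: alternative structure, same cost.

-- ===== PORT A =====
-- A's while-loop; fuel only makes it total (Python raises IndexError where pyGet? is none)
def varintLoopA (b : List Int) : Nat → Int → Int → Int × Int
  | 0, _, _ => (0, 0)                                -- fuel exhausted: unreachable under Pre_
  | f + 1, n, i =>
    match PySem.List.pyGet? b i with
    | none => (0, 0)                                 -- IndexError in Python: outside Pre_
    | some c =>
      if 128 ≤ c then
        varintLoopA b f (n * 128 + PySem.Int.band c 127) (i + 1)  -- n = (n << 7) + (c & 0x7f); i += 1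
      else (n * 128 + c, i + 1)                      -- return (n << 7) + c, i + 1

def varint_and_next_index (b : List Int) (i : Int) : Int × Int :=
  match PySem.List.pyGet? b i with
  | none => (0, 0)                                   -- IndexError: outside Pre_
  | some c =>
    if c < 128 then (c, i + 1)                       -- fast path of A
    else varintLoopA b (2 * b.length + 1) 0 i

-- ===== PORT B =====
-- phase 1 of B: scan forward for the first index j ≥ i with b[j] < 0x80 (fuel only makes it total)
def varintScan (b : List Int) : Nat → Int → Option Int
  | 0, _ => none
  | f + 1, j =>
    match PySem.List.pyGet? b j with
    | none => none                                   -- IndexError in Python: outside Pre_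
    | some c => if 128 ≤ c then varintScan b f (j + 1) else some j

def varint_and_next_index_alt (b : List Int) (i : Int) : Int × Int :=
  match varintScan b (2 * b.length + 1) i with
  | none => (0, 0)                                   -- IndexError: outside Pre_
  | some j =>
    -- phase 2 of B: fold the continuation bytes, then add the final byte
    let value := (PySem.List.pyRange i j 1).foldl
        (fun v k => v * 128 + PySem.Int.band (PySem.List.pyGetD b k 0) 127) 0
    (value * 128 + PySem.List.pyGetD b j 0, j + 1)

-- ===== PRECONDITION & SPEC =====
-- Pre_ excludes exactly the inputs where A raises IndexError: i out of range, or no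
-- terminating byte (< 0x80) is ever reached (for negative i the scan wraps to index 0,
-- so any byte < 0x80 in the list suffices).
def Pre_varint_and_next_index (b : List Int) (i : Int) : Prop :=
  if i < 0 then (-(b.length : Int) ≤ i ∧ ∃ x ∈ b, x < 128)
  else (∃ x ∈ b.drop i.toNat, x < 128)
instance (b : List Int) (i : Int) : Decidable (Pre_varint_and_next_index b i) := by
  unfold Pre_varint_and_next_index; infer_instance

def pvWitness_varint_and_next_index : List Int × Int := ([129, 5], 0)

def Spec_varint_and_next_index (b : List Int) (i : Int) (out : Int × Int) : Prop := out = varint_and_next_index_alt b i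
instance (b : List Int) (i : Int) (out : Int × Int) : Decidable (Spec_varint_and_next_index b i out) := by unfold Spec_varint_and_next_index; infer_instance

-- ===== CLAIM (what is proved, stated in full; the proofs are below) =====
def Claim_equal_varint_and_next_index : Prop := ∀ (b : List Int) (i : Int), Dom_varint_and_next_index b i → Pre_varint_and_next_index b i → Spec_varint_and_next_index b i (varint_and_next_index b i)

-- ===== LEMMAS AND PROOFS =====

-- the scan never returns an index left of where it started
theorem varintScan_le (b : List Int) : ∀ (f : Nat) (i j : Int),
    varintScan b f i = some j → i ≤ j := by
  intro f
  induction f with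
  | zero => intro i j h; simp [varintScan] at h
  | succ f ih =>
    intro i j h
    cases hg : PySem.List.pyGet? b i with
    | none => simp [varintScan, hg] at h
    | some c =>
      simp only [varintScan, hg] at h
      by_cases hc : 128 ≤ c
      · rw [if_pos hc] at h; have := ih _ _ h; omega
      · rw [if_neg hc] at h; simp at h; omega

-- pyGetD agrees with a successful pyGet?
theorem pyGetD_of_pyGet?_some (b : List Int) (i : Int) (c : Int)
    (h : PySem.List.pyGet? b i = some c) : PySem.List.pyGetD b i 0 = c := by
  simp [PySem.List.pyGetD, h]

-- A's interleaved loop equals B's scan-then-fold, accumulator generalized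
theorem varint_bridge (b : List Int) : ∀ (f : Nat) (i n j : Int),
    varintScan b f i = some j →
    varintLoopA b f n i =
      ((PySem.List.pyRange i j 1).foldl
          (fun v k => v * 128 + PySem.Int.band (PySem.List.pyGetD b k 0) 127) n * 128
        + PySem.List.pyGetD b j 0, j + 1) := by
  intro f
  induction f with
  | zero => intro i n j h; simp [varintScan] at h
  | succ f ih =>
    intro i n j h
    cases hg : PySem.List.pyGet? b i with
    | none => simp [varintScan, hg] at h
    | some c =>
      simp only [varintScan, hg] at h
      by_cases hc : 128 ≤ c
      · rw [if_pos hc] at h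
        have hij : i < j := by have := varintScan_le b f (i + 1) j h; omega
        simp only [varintLoopA, hg, if_pos hc]
        rw [ih _ _ _ h, PySem.List.pyRange_one_cons hij, List.foldl_cons,
          pyGetD_of_pyGet?_some b i c hg]
      · rw [if_neg hc] at h
        simp only [Option.some.injEq] at h
        subst h
        simp only [varintLoopA, hg, if_neg hc]
        rw [PySem.List.pyRange_one_eq_nil le_rfl, List.foldl_nil,
          pyGetD_of_pyGet?_some b i c hg]

-- under Pre_ with a nonnegative start, the scan succeeds given enough fuel
theorem varintScan_succeeds_nonneg (b : List Int) : ∀ (f : Nat) (i : Int), 0 ≤ i →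
    (∃ x ∈ b.drop i.toNat, x < 128) → b.length - i.toNat ≤ f →
    (varintScan b f i).isSome := by
  intro f
  induction f with
  | zero =>
    intro i hi hx hf
    obtain ⟨x, hmem, _⟩ := hx
    have : i.toNat < b.length := by
      by_contra hlen
      rw [List.drop_eq_nil_of_le (by omega)] at hmem
      simp at hmem
    omega
  | succ f ih =>
    intro i hi hx hf
    obtain ⟨x, hmem, hxlt⟩ := hx
    have hlt : i.toNat < b.length := by
      by_contra hlen
      rw [List.drop_eq_nil_of_le (by omega)] at hmem
      simp at hmem
    have hg : PySem.List.pyGet? b i = some b[i.toNat] :=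
      PySem.List.pyGet?_eq_some_getElem b hi (by omega)
    simp only [varintScan, hg]
    by_cases hc : 128 ≤ b[i.toNat]
    · rw [if_pos hc]
      apply ih (i + 1) (by omega)
      · have hdrop : b.drop i.toNat = b[i.toNat] :: b.drop (i.toNat + 1) :=
          List.drop_eq_getElem_cons hlt
        rw [hdrop] at hmem
        rcases List.mem_cons.mp hmem with h | h
        · omega
        · exact ⟨x, by rw [show (i + 1).toNat = i.toNat + 1 by omega]; exact h, hxlt⟩
      · omega
    · rw [if_neg hc]; simp
-- under Pre_ with a negative start, the scan succeeds given enough fuel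
theorem varintScan_succeeds_neg (b : List Int) : ∀ (f : Nat) (i : Int), i < 0 →
    -(b.length : Int) ≤ i → (∃ x ∈ b, x < 128) → (-i).toNat + b.length ≤ f →
    (varintScan b f i).isSome := by
  intro f
  induction f with
  | zero => intro i hi _ _ hf; omega
  | succ f ih =>
    intro i hi hlen hx hf
    have hne : b ≠ [] := by
      obtain ⟨x, hmem, _⟩ := hx
      exact List.ne_nil_of_mem hmem
    have hlen1 : 1 ≤ b.length := by
      cases b with
      | nil => simp at hne
      | cons _ _ => simp
    have hrange : PySem.Raise.InRange b.length i := by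
      constructor <;> omega
    have hsome : (PySem.List.pyGet? b i).isSome := by
      rw [Option.isSome_iff_ne_none]
      intro hnone
      exact ((PySem.List.pyGet?_eq_none_iff b i).mp hnone) hrange
    obtain ⟨c, hg⟩ := Option.isSome_iff_exists.mp hsome
    simp only [varintScan, hg]
    by_cases hc : 128 ≤ c
    · rw [if_pos hc]
      by_cases hi1 : i + 1 < 0
      · exact ih (i + 1) hi1 (by omega) hx (by omega)
      · have : i + 1 = 0 := by omega
        rw [this]
        apply varintScan_succeeds_nonneg b f 0 le_rfl
        · simpa using hx
        · omega
    · rw [if_neg hc]; simp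

-- ===== VERDICT (by name: the statement is the Claim_ definition above) =====
theorem varint_and_next_index_spec : Claim_equal_varint_and_next_index := by
  intro b i _ hpre
  unfold Spec_varint_and_next_index
  unfold Pre_varint_and_next_index at hpre
  have hscan : (varintScan b (2 * b.length + 1) i).isSome := by
    by_cases hi : i < 0
    · rw [if_pos hi] at hpre
      exact varintScan_succeeds_neg b _ i hi hpre.1 hpre.2 (by omega)
    · rw [if_neg hi] at hpre
      exact varintScan_succeeds_nonneg b _ i (by omega) hpre (by omega)
  -- reduce Pre_ to "pyGet? b i is some"
  have hrange : PySem.Raise.InRange b.length i := by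
    by_cases hi : i < 0
    · rw [if_pos hi] at hpre; exact ⟨by omega, by omega⟩
    · rw [if_neg hi] at hpre
      obtain ⟨x, hmem, _⟩ := hpre
      have : i.toNat < b.length := by
        by_contra hlen
        rw [List.drop_eq_nil_of_le (by omega)] at hmem
        simp at hmem
      exact ⟨by omega, by omega⟩
  have hsome : (PySem.List.pyGet? b i).isSome := by
    rw [Option.isSome_iff_ne_none]
    intro hnone
    exact ((PySem.List.pyGet?_eq_none_iff b i).mp hnone) hrange
  obtain ⟨c, hg⟩ := Option.isSome_iff_exists.mp hsome
  obtain ⟨j, hj⟩ := Option.isSome_iff_exists.mp hscan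
  unfold varint_and_next_index varint_and_next_index_alt
  simp only [hg, hj]
  by_cases hc : c < 128
  · rw [if_pos hc]
    -- scan stops immediately: j = i
    have hji : j = i := by
      cases hn : 2 * b.length + 1 with
      | zero => omega
      | succ f =>
        rw [hn] at hj
        simp only [varintScan, hg] at hj
        rw [if_neg (by omega)] at hj
        simp at hj
        omega
    subst hji
    rw [PySem.List.pyRange_one_eq_nil le_rfl, List.foldl_nil,
      pyGetD_of_pyGet?_some b j c hg]
    norm_num
  · rw [if_neg hc]
    exact varint_bridge b _ i 0 j hj
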